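-- pv_equiv track=rewrite | github.com/nodeadtree/deltapoint | perftest/dp2.py | sequencer
-- ===== SOURCE A (Python) =====
-- def sequencer(seq, n,front=list(), ):
--     if n < 1:
--         return
--     combos = []
--     for j,i in enumerate(seq):
--         f = front + [i]
--         s1 = sequencer(seq[j:],n-1,f)
--         if s1 is not None:
--             combos = combos + s1
--         if s1 is None:# and s1 is None:
--            combos = combos+[f]
--     return combos
-- ===== SOURCE B (Python) =====
-- def sequencer(seq, n, front=list()):
--     # Top-down combinations-with-replacement: binary take-head / drop-head
--     # recursion instead of A's n-ary enumerate + slicing loop with a None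
--     # sentinel; the front prefix is attached once at the end.
--     if n < 1:
--         return None
--     return [front + c for c in _cwr(n, list(seq))]
--
--
-- def _cwr(n, seq):
--     # all length-n combinations with replacement of seq, lexicographic by index
--     if n == 0:
--         return [[]]
--     if not seq:
--         return []
--     return [[seq[0]] + c for c in _cwr(n - 1, seq)] + _cwr(n, seq[1:])
-- ===== Notes on version B (the rewrite author's own statement) =====
-- stated objective: alternative
-- what changed: Replaced A's n-ary recursion (enumerate over seq with seq[j:] slices, a threaded front accumulator and a None-sentinel base case detected in the parent) by a binary take-head/drop-head combinations-with-replacement recursion whose results get the front prefix mapped on once at the end.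
import Mathlib
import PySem

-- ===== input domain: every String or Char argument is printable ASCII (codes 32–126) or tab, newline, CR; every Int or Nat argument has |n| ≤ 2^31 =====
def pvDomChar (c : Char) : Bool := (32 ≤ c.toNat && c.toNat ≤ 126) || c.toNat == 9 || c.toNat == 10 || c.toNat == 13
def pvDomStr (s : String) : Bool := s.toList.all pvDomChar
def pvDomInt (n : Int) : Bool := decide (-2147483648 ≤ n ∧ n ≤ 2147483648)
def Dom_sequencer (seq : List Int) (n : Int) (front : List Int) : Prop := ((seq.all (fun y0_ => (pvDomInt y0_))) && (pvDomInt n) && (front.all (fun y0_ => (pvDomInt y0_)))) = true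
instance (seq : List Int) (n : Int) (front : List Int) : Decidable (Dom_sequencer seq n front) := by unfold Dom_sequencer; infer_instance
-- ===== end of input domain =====

-- B replaces A's enumerate+slicing recursion (front accumulator, None sentinel) by a binary
-- take-head/drop-head combinations-with-replacement recursion (objective: alternative).


-- ===== PORT A =====
-- A's loop 'for j,i in enumerate(seq)' with the recursive call on seq[j:] is transcribed as a
-- recursion over the successive suffixes of seq (seq[j:] is exactly the suffix starting at i);
-- the fuel k is n.toNat, and the recursive call's 'is None' outcome is its guard n-1 < 1, i.e. k - 1 < 1.
def seqALoop : Nat → List Int → List Int → List (List Int)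
  | _, [], _ => []
  | k, i :: rest, front =>
      let f := front ++ [i]
      (if k - 1 < 1 then [f] else seqALoop (k - 1) (i :: rest) f) ++ seqALoop k rest front
  termination_by k s _ => (k, s.length)

def sequencer (seq : List Int) (n : Int) (front : List Int) : Option (List (List Int)) :=
  if n < 1 then none
  else some (seqALoop n.toNat seq front)

-- ===== PORT B =====
-- Source B's _cwr: 'if n == 0: [[]]; if not seq: []; [[seq[0]]+c for c in _cwr(n-1, seq)] + _cwr(n, seq[1:])'
def cwrB : Nat → List Int → List (List Int)
  | 0, _ => [[]]
  | _ + 1, [] => []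
  | k + 1, x :: xs => ((cwrB k (x :: xs)).map (fun c => x :: c)) ++ cwrB (k + 1) xs
  termination_by k s => (k, s.length)

-- Source B: 'return [front + c for c in _cwr(n, list(seq))]'
def sequencer_alt (seq : List Int) (n : Int) (front : List Int) : Option (List (List Int)) :=
  if n < 1 then none
  else some ((cwrB n.toNat seq).map (fun c => front ++ c))

-- ===== PRECONDITION & SPEC =====
-- Pre_ excludes inputs with nonempty seq and n > 9900: there A's recursion of depth n overflows
-- the interpreter's recursion limit and raises RecursionError (already at n ≈ 1000 under
-- CPython's default limit; the bound sits just below the largest limit A is run under).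
def Pre_sequencer (seq : List Int) (n : Int) (front : List Int) : Prop := seq = [] ∨ n ≤ 9900
instance (seq : List Int) (n : Int) (front : List Int) : Decidable (Pre_sequencer seq n front) := by unfold Pre_sequencer; infer_instance
def pvWitness_sequencer : List Int × Int × List Int := ([1, 2], 2, [])
def Spec_sequencer (seq : List Int) (n : Int) (front : List Int) (out : Option (List (List Int))) : Prop := out = sequencer_alt seq n front
instance (seq : List Int) (n : Int) (front : List Int) (out : Option (List (List Int))) : Decidable (Spec_sequencer seq n front out) := by unfold Spec_sequencer; infer_instance

-- ===== CLAIM (what is proved, stated in full; the proofs are below) =====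
def Claim_equal_sequencer : Prop := ∀ (seq : List Int) (n : Int) (front : List Int), Dom_sequencer seq n front → Pre_sequencer seq n front → Spec_sequencer seq n front (sequencer seq n front)

-- ===== LEMMAS AND PROOFS =====

-- main correspondence: A's suffix recursion equals B's take/drop cwr with the prefix mapped on,
-- for fuel k ≥ 1
theorem seqALoop_eq_cwr (k : Nat) (seq front : List Int) (hk : 1 ≤ k) :
    seqALoop k seq front = (cwrB k seq).map (fun c => front ++ c) := by
  fun_induction seqALoop k seq front with
  | case1 k front =>
      obtain ⟨m, rfl⟩ : ∃ m, k = m + 1 := ⟨k - 1, by omega⟩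
      simp [cwrB]
  | case2 k i rest front f ihA ihB =>
      obtain ⟨m, rfl⟩ : ∃ m, k = m + 1 := ⟨k - 1, by omega⟩
      have hB := ihB hk
      rw [cwrB, List.map_append, List.map_map, ← hB]
      by_cases hm : m = 0
      · subst hm
        simp [cwrB, f]
      · have h1 : ¬ (m + 1 - 1 < 1) := by omega
        rw [if_neg h1]
        have hA := ihA (by omega) (by omega)
        simp only [Nat.add_sub_cancel] at hA ⊢
        rw [hA]
        congr 1
        exact List.map_congr_left (fun c _ => by simp [f])

-- ===== VERDICT (by name: the statement is the Claim_ definition above) =====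
theorem sequencer_spec : Claim_equal_sequencer := by
  intro seq n front _ _
  unfold Spec_sequencer sequencer sequencer_alt
  by_cases h : n < 1
  · simp [h]
  · rw [if_neg h, if_neg h, seqALoop_eq_cwr]
    omega
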